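-- pv_equiv track=rewrite | github.com/RiccardoMPesce/Project-Euler | problems/highly_divisible_triangle_numbers.py | generate_list_of_triangle_numbers
-- ===== SOURCE A (Python) =====
-- def generate_list_of_triangle_numbers(up_to_n):
--     ls = []
--
--     for i in range(1, up_to_n + 1):
--         sum = i
--         for j in range(1, i):
--             sum += j
--         ls += [sum]
--
--     return ls
-- ===== SOURCE B (Python) =====
-- def generate_list_of_triangle_numbers(up_to_n):
--     return [i * (i + 1) // 2 for i in range(1, up_to_n + 1)]
-- ===== Notes on version B (the rewrite author's own statement) =====
-- stated objective: faster
-- what changed: Replaced the quadratic nested summation loop by the closed form i*(i+1)//2 for each triangle number.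
import Mathlib
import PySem

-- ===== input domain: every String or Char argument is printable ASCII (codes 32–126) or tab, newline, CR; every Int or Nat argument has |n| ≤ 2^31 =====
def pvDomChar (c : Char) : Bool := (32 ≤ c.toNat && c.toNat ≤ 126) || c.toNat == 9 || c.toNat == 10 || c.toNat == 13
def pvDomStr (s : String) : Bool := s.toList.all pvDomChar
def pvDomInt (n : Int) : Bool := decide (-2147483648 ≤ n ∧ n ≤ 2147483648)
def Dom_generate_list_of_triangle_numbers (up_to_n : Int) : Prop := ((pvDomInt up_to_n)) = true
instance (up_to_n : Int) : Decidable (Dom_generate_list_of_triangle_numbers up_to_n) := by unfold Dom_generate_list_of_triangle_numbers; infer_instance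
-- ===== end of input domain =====

-- B replaces A's quadratic nested summation loop by the closed form i*(i+1)//2 (asymptotically faster).

-- ===== PORT A =====
def generate_list_of_triangle_numbers (up_to_n : Int) : List Int :=
  (PySem.List.pyRange 1 (up_to_n + 1) 1).foldl
    (fun ls i =>
      let sum := (PySem.List.pyRange 1 i 1).foldl (fun s j => s + j) i
      ls ++ [sum]) []

-- ===== PORT B =====
def generate_list_of_triangle_numbers_alt (up_to_n : Int) : List Int :=
  (PySem.List.pyRange 1 (up_to_n + 1) 1).map (fun i => PySem.Int.floordiv (i * (i + 1)) 2)

-- ===== PRECONDITION & SPEC =====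
def Spec_generate_list_of_triangle_numbers (up_to_n : Int) (out : List Int) : Prop := out = generate_list_of_triangle_numbers_alt up_to_n
instance (up_to_n : Int) (out : List Int) : Decidable (Spec_generate_list_of_triangle_numbers up_to_n out) := by unfold Spec_generate_list_of_triangle_numbers; infer_instance

-- ===== CLAIM (what is proved, stated in full; the proofs are below) =====
def Claim_equal_generate_list_of_triangle_numbers : Prop := ∀ (up_to_n : Int), Dom_generate_list_of_triangle_numbers up_to_n → Spec_generate_list_of_triangle_numbers up_to_n (generate_list_of_triangle_numbers up_to_n)

-- ===== LEMMAS AND PROOFS =====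

-- A's inner loop: summing range(1, i) starting from accumulator c adds (i-1)·i/2, i.e. for
-- a nonnegative count k, folding (1+j) for j < k onto c gives c + k(k+1)/2 (stated without division).
theorem pv_inner_sum (k : Nat) (c : Int) :
    ((List.range k).foldl (fun (s : Int) (j : Nat) => s + (1 + (j : Int))) c) * 2
      = c * 2 + (k : Int) * ((k : Int) + 1) := by
  induction k generalizing c with
  | zero => simp
  | succ m ih =>
    rw [List.range_succ, List.foldl_append]
    simp only [List.foldl_cons, List.foldl_nil]
    have h := ih c
    push_cast at h ⊢
    linear_combination h

theorem pv_elem (i : Int) (hi : 1 ≤ i) :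
    (PySem.List.pyRange 1 i 1).foldl (fun s j => s + j) i
      = PySem.Int.floordiv (i * (i + 1)) 2 := by
  rw [PySem.Int.floordiv_eq_ediv_of_pos (by omega)]
  rw [PySem.List.pyRange_one, List.foldl_map]
  have h2 := pv_inner_sum (i - 1).toNat i
  have hk : (((i - 1).toNat : Nat) : Int) = i - 1 := by omega
  rw [hk] at h2
  set S := (List.range (i - 1).toNat).foldl (fun (s : Int) (j : Nat) => s + (1 + (j : Int))) i with hS
  have hmul : i * (i + 1) = S * 2 := by linear_combination -h2
  rw [hmul, Int.mul_ediv_cancel S (by norm_num)]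

theorem pv_fold_map (l : List Int) (acc : List Int) :
    l.foldl (fun ls i =>
      let sum := (PySem.List.pyRange 1 i 1).foldl (fun s j => s + j) i
      ls ++ [sum]) acc
      = acc ++ l.map (fun i => (PySem.List.pyRange 1 i 1).foldl (fun s j => s + j) i) := by
  induction l generalizing acc with
  | nil => simp
  | cons h t ih => simp [ih]

-- ===== VERDICT (by name: the statement is the Claim_ definition above) =====
theorem generate_list_of_triangle_numbers_spec : Claim_equal_generate_list_of_triangle_numbers := by
  intro n _
  unfold Spec_generate_list_of_triangle_numbers generate_list_of_triangle_numbers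
    generate_list_of_triangle_numbers_alt
  rw [pv_fold_map]
  simp only [List.nil_append]
  apply List.map_congr_left
  intro i hi
  have h1 : 1 ≤ i := (PySem.List.mem_pyRange_one.mp hi).1
  exact pv_elem i h1
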